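-- pv_equiv track=rewrite | github.com/SashaV21/Algorithm | 2.0/Lection 7 YANDEX/ex_3.py | boss_count
-- ===== SOURCE A (Python) =====
-- def boss_count(n, tin, tout, m, t_boss):
--     events = []
--     for i in range(n):
--         events.append((tin[i], -1))
--         events.append((tout[i], 1))
--     for i in range(m):
--         events.append((t_boss, 0))
--     events.sort()
--     online = 0
--     boss_ans = []
--     for event in events:
--         if event[1] == -1:
--             online += 1
--         elif event[1] == 1:
--             online -= 1
--         else:
--             boss_ans.append(online)
--     return boss_ans
-- ===== SOURCE B (Python) =====
-- def boss_count(n, tin, tout, m, t_boss):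
--     # One pass, no event list, no sort: a colleague is online at t_boss
--     # iff tin[i] <= t_boss and not tout[i] < t_boss (A's sort puts login
--     # events before and logout events after the boss query at equal times).
--     c = 0
--     for i in range(n):
--         if tin[i] <= t_boss:
--             c += 1
--         if tout[i] < t_boss:
--             c -= 1
--     return [c] * m
-- ===== Notes on version B (the rewrite author's own statement) =====
-- stated objective: faster
-- what changed: Replaces the build-2n+m-events/sort/sweep pipeline by a single counting pass (logins with tin[i] <= t_boss minus logouts with tout[i] < t_boss) and emits the constant answer m times.
import Mathlib
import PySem

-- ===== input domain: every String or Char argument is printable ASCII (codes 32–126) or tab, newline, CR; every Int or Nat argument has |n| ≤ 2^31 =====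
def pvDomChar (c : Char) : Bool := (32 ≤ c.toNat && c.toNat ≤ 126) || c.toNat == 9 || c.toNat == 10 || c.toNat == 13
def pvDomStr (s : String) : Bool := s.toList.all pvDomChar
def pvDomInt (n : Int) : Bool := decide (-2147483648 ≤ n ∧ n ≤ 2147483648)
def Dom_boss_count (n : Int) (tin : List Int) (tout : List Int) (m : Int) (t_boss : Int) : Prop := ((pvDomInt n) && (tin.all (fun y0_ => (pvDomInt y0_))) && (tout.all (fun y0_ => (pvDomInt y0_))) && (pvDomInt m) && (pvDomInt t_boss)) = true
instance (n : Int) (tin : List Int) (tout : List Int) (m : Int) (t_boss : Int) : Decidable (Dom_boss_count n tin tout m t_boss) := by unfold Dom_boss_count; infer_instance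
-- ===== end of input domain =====

-- B replaces A's build-events/sort/sweep pipeline by one counting pass (#logins with
-- tin[i] <= t_boss minus #logouts with tout[i] < t_boss) repeated m times; the timing
-- run measures whether that is faster — here only the equality of results is proved.

-- ===== PORT A =====
def boss_count (n : Int) (tin : List Int) (tout : List Int) (m : Int) (t_boss : Int) : List Int :=
  let events := (PySem.List.pyRange 0 n 1).foldl
    (fun acc i =>
      (acc ++ [(PySem.List.pyGetD tin i 0, (-1 : Int))]) ++ [(PySem.List.pyGetD tout i 0, (1 : Int))]) []
  let events := (PySem.List.pyRange 0 m 1).foldl (fun acc _ => acc ++ [(t_boss, (0 : Int))]) events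
  let events := PySem.List.sorted2 events Prod.fst Prod.snd
  let r := events.foldl
    (fun (st : Int × List Int) event =>
      if event.2 = -1 then (st.1 + 1, st.2)
      else if event.2 = 1 then (st.1 - 1, st.2)
      else (st.1, st.2 ++ [st.1])) ((0 : Int), ([] : List Int))
  r.2

-- ===== PORT B =====
def boss_count_alt (n : Int) (tin : List Int) (tout : List Int) (m : Int) (t_boss : Int) : List Int :=
  let c := (PySem.List.pyRange 0 n 1).foldl
    (fun c i =>
      let c := if PySem.List.pyGetD tin i 0 ≤ t_boss then c + 1 else c
      if PySem.List.pyGetD tout i 0 < t_boss then c - 1 else c) (0 : Int)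
  List.replicate m.toNat c

-- ===== PRECONDITION & SPEC =====
-- Pre_ excludes exactly the inputs where Python A raises IndexError: n larger than a list's length.
def Pre_boss_count (n : Int) (tin : List Int) (tout : List Int) (m : Int) (t_boss : Int) : Prop :=
  n ≤ (tin.length : Int) ∧ n ≤ (tout.length : Int)
instance (n : Int) (tin : List Int) (tout : List Int) (m : Int) (t_boss : Int) : Decidable (Pre_boss_count n tin tout m t_boss) := by unfold Pre_boss_count; infer_instance

def pvWitness_boss_count : Int × List Int × List Int × Int × Int := (2, [1, 3], [5, 4], 2, 3)

def Spec_boss_count (n : Int) (tin : List Int) (tout : List Int) (m : Int) (t_boss : Int) (out : List Int) : Prop := out = boss_count_alt n tin tout m t_boss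
instance (n : Int) (tin : List Int) (tout : List Int) (m : Int) (t_boss : Int) (out : List Int) : Decidable (Spec_boss_count n tin tout m t_boss out) := by unfold Spec_boss_count; infer_instance

-- ===== CLAIM (what is proved, stated in full; the proofs are below) =====
def Claim_equal_boss_count : Prop := ∀ (n : Int) (tin : List Int) (tout : List Int) (m : Int) (t_boss : Int), Dom_boss_count n tin tout m t_boss → Pre_boss_count n tin tout m t_boss → Spec_boss_count n tin tout m t_boss (boss_count n tin tout m t_boss)

-- ===== LEMMAS AND PROOFS =====

-- Python's lexicographic ≤ on (time, tag) pairs.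
def pvLexLe (a b : Int × Int) : Prop := a.1 < b.1 ∨ (a.1 = b.1 ∧ a.2 ≤ b.2)

-- sorted2's strict-before test, specialised to our pairs.
def pvLtB (a b : Int × Int) : Bool :=
  decide (a.1 < b.1) || (!decide (b.1 < a.1) && decide (a.2 < b.2))

-- The outputs A's sweep appends, as a recursion over the event list.
def pvOuts : List (Int × Int) → Int → List Int
  | [], _ => []
  | e :: rest, o =>
    if e.2 = -1 then pvOuts rest (o + 1)
    else if e.2 = 1 then pvOuts rest (o - 1)
    else o :: pvOuts rest o

theorem pvSweep_eq_outs (l : List (Int × Int)) : ∀ (o : Int) (acc : List Int),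
    (l.foldl (fun (st : Int × List Int) event =>
      if event.2 = -1 then (st.1 + 1, st.2)
      else if event.2 = 1 then (st.1 - 1, st.2)
      else (st.1, st.2 ++ [st.1])) (o, acc)).2 = acc ++ pvOuts l o := by
  induction l with
  | nil => intro o acc; simp [pvOuts]
  | cons e rest ih =>
    intro o acc
    by_cases h1 : e.2 = -1
    · simp [List.foldl_cons, h1, pvOuts, ih]
    · by_cases h2 : e.2 = 1
      · simp [List.foldl_cons, h2, pvOuts, ih]
      · simp [List.foldl_cons, h1, h2, pvOuts, ih]

theorem pvLtB_true {a b : Int × Int} (h : pvLtB a b = true) : pvLexLe a b := by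
  unfold pvLtB at h; unfold pvLexLe
  simp only [Bool.or_eq_true, Bool.and_eq_true, Bool.not_eq_true', decide_eq_true_eq,
    decide_eq_false_iff_not] at h
  omega

theorem pvLtB_false {a b : Int × Int} (h : pvLtB a b = false) : pvLexLe b a := by
  unfold pvLtB at h; unfold pvLexLe
  simp only [Bool.or_eq_false_iff, Bool.and_eq_false_iff, Bool.not_eq_false',
    decide_eq_true_eq, decide_eq_false_iff_not] at h
  omega

theorem pvLexLe_trans {a b c : Int × Int} (h1 : pvLexLe a b) (h2 : pvLexLe b c) : pvLexLe a c := by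
  unfold pvLexLe at *; omega

theorem pvInsertBy_pairwise (x : Int × Int) : ∀ (ys : List (Int × Int)),
    ys.Pairwise pvLexLe → (PySem.List.insertBy pvLtB x ys).Pairwise pvLexLe := by
  intro ys
  induction ys with
  | nil => intro _; simp [PySem.List.insertBy]
  | cons y ys ih =>
    intro h
    rw [List.pairwise_cons] at h
    rw [PySem.List.insertBy]
    by_cases hb : pvLtB x y = true
    · simp only [hb, if_true]
      refine List.pairwise_cons.2 ⟨?_, List.pairwise_cons.2 h⟩
      intro z hz
      rcases List.mem_cons.1 hz with rfl | hz
      · exact pvLtB_true hb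
      · exact pvLexLe_trans (pvLtB_true hb) (h.1 z hz)
    · simp only [hb]
      refine List.pairwise_cons.2 ⟨?_, ih h.2⟩
      intro z hz
      rcases (PySem.List.insertBy_mem_iff pvLtB x z ys).1 hz with rfl | hz
      · exact pvLtB_false (by simpa using hb)
      · exact h.1 z hz

theorem pvFoldl_insertBy_pairwise (l : List (Int × Int)) : ∀ (acc : List (Int × Int)),
    acc.Pairwise pvLexLe →
    (l.foldl (fun acc x => PySem.List.insertBy pvLtB x acc) acc).Pairwise pvLexLe := by
  induction l with
  | nil => intro acc h; simpa using h
  | cons x l ih => intro acc h; exact ih _ (pvInsertBy_pairwise x acc h)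

theorem pvSorted2_pairwise (xs : List (Int × Int)) :
    (PySem.List.sorted2 xs Prod.fst Prod.snd).Pairwise pvLexLe := by
  have : PySem.List.sorted2 xs Prod.fst Prod.snd =
      xs.foldl (fun acc x => PySem.List.insertBy pvLtB x acc) [] := rfl
  rw [this]
  exact pvFoldl_insertBy_pairwise xs [] (by simp)

-- The heart of the equivalence: on a lex-sorted event list whose tags are -1/1 except
-- boss events (tag 0, time t), the sweep outputs are the constant closed-form count.
theorem pvOuts_sorted (t : Int) : ∀ (l : List (Int × Int)), l.Pairwise pvLexLe →
    (∀ e ∈ l, e.2 = -1 ∨ e.2 = 1 ∨ (e.2 = 0 ∧ e.1 = t)) →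
    ∀ o : Int, pvOuts l o = List.replicate (l.countP (fun e => e.2 == 0))
      (o + (l.countP (fun e => e.2 == -1 && e.1 ≤ t) : Int)
         - (l.countP (fun e => e.2 == 1 && e.1 < t) : Int)) := by
  intro l
  induction l with
  | nil => intro _ _ o; simp [pvOuts]
  | cons e rest ih =>
    intro hp htags o
    rw [List.pairwise_cons] at hp
    have ihr := ih hp.2 (fun x hx => htags x (List.mem_cons_of_mem e hx))
    rcases htags e (List.mem_cons_self) with h1 | h1 | h1
    · -- login event
      by_cases ha : e.1 ≤ t
      · rw [pvOuts, if_pos h1, ihr (o + 1)]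
        simp only [List.countP_cons, h1, ha]
        norm_num
        omega
      · -- e.1 > t: no boss event can follow, both sides are empty
        have hz : rest.countP (fun e => e.2 == 0) = 0 := by
          rw [List.countP_eq_zero]
          intro x hx hx0
          simp only [beq_iff_eq] at hx0
          rcases htags x (List.mem_cons_of_mem e hx) with h | h | h
          · omega
          · omega
          · have := hp.1 x hx
            unfold pvLexLe at this
            omega
        rw [pvOuts, if_pos h1, ihr (o + 1)]
        simp only [List.countP_cons, h1, hz]
        norm_num [ha]
    · -- logout event
      by_cases ha : e.1 < t
      · rw [pvOuts, if_neg (by omega), if_pos h1, ihr (o - 1)]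
        simp only [List.countP_cons, h1, ha]
        norm_num
        omega
      · have hz : rest.countP (fun e => e.2 == 0) = 0 := by
          rw [List.countP_eq_zero]
          intro x hx hx0
          simp only [beq_iff_eq] at hx0
          rcases htags x (List.mem_cons_of_mem e hx) with h | h | h
          · omega
          · omega
          · have := hp.1 x hx
            unfold pvLexLe at this
            omega
        rw [pvOuts, if_neg (by omega), if_pos h1, ihr (o - 1)]
        simp only [List.countP_cons, h1, hz]
        norm_num [ha]
    · -- boss event: everything after it has time > t (logins) resp. ≥ t (logouts)
      obtain ⟨h0, hteq⟩ := h1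
      have hin : rest.countP (fun e => e.2 == -1 && e.1 ≤ t) = 0 := by
        rw [List.countP_eq_zero]
        intro x hx hxp
        simp only [Bool.and_eq_true, beq_iff_eq, decide_eq_true_eq] at hxp
        have := hp.1 x hx
        unfold pvLexLe at this
        omega
      have hout : rest.countP (fun e => e.2 == 1 && e.1 < t) = 0 := by
        rw [List.countP_eq_zero]
        intro x hx hxp
        simp only [Bool.and_eq_true, beq_iff_eq, decide_eq_true_eq] at hxp
        have := hp.1 x hx
        unfold pvLexLe at this
        omega
      rw [pvOuts, if_neg (by omega), if_neg (by omega), ihr o]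
      simp only [List.countP_cons, h0, hin, hout]
      norm_num [List.replicate_succ]

-- Building the event list: first loop is a flatMap, second appends m copies.
theorem pvEv1 (f g : Int → Int × Int) (l : List Int) : ∀ (acc : List (Int × Int)),
    l.foldl (fun acc i => (acc ++ [f i]) ++ [g i]) acc
      = acc ++ l.flatMap (fun i => [f i, g i]) := by
  induction l with
  | nil => intro acc; simp
  | cons x l ih =>
    intro acc
    rw [List.foldl_cons, ih]
    simp [List.flatMap_cons]

theorem pvEv2 (p : Int × Int) (l : List Int) : ∀ (acc : List (Int × Int)),
    l.foldl (fun acc _ => acc ++ [p]) acc = acc ++ List.replicate l.length p := by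
  induction l with
  | nil => intro acc; simp
  | cons x l ih =>
    intro acc
    rw [List.foldl_cons, ih]
    simp [List.replicate_succ]

-- countP of the login/logout flatMap, for each of the three predicates.
theorem pvFlatMap_countP (f g : Int → Int × Int) (p : Int × Int → Bool) (l : List Int) :
    (l.flatMap (fun i => [f i, g i])).countP p
      = l.countP (fun i => p (f i)) + l.countP (fun i => p (g i)) := by
  induction l with
  | nil => simp
  | cons x l ih =>
    simp only [List.flatMap_cons, List.countP_append, List.countP_cons, List.countP_nil, ih]
    omega

-- B's fold computes the two counts directly.
theorem pvBfold (tin tout : List Int) (t : Int) (l : List Int) : ∀ (c : Int),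
    l.foldl (fun c i =>
      let c := if PySem.List.pyGetD tin i 0 ≤ t then c + 1 else c
      if PySem.List.pyGetD tout i 0 < t then c - 1 else c) c
    = c + (l.countP (fun i => PySem.List.pyGetD tin i 0 ≤ t) : Int)
        - (l.countP (fun i => PySem.List.pyGetD tout i 0 < t) : Int) := by
  induction l with
  | nil => intro c; simp
  | cons x l ih =>
    intro c
    simp only [List.foldl_cons, List.countP_cons, ih]
    split_ifs <;> simp_all <;> omega

-- ===== VERDICT (by name: the statement is the Claim_ definition above) =====
theorem boss_count_spec : Claim_equal_boss_count := by
  intro n tin tout m t_boss _ _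
  unfold Spec_boss_count boss_count boss_count_alt
  simp only [pvEv1, pvEv2, pvSweep_eq_outs, List.nil_append]
  set ev : List (Int × Int) :=
    (PySem.List.pyRange 0 n 1).flatMap
        (fun i => [(PySem.List.pyGetD tin i 0, (-1 : Int)), (PySem.List.pyGetD tout i 0, (1 : Int))])
      ++ List.replicate (PySem.List.pyRange 0 m 1).length (t_boss, (0 : Int)) with hev
  have hperm := PySem.List.sorted2_perm ev Prod.fst Prod.snd false
  have htags : ∀ e ∈ PySem.List.sorted2 ev Prod.fst Prod.snd,
      e.2 = -1 ∨ e.2 = 1 ∨ (e.2 = 0 ∧ e.1 = t_boss) := by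
    intro e he
    have : e ∈ ev := hperm.mem_iff.1 he
    rw [hev] at this
    rcases List.mem_append.1 this with h | h
    · rcases List.mem_flatMap.1 h with ⟨i, _, hi⟩
      rcases List.mem_cons.1 hi with h | h
      · left; rw [h]
      · right; left; rw [List.mem_singleton.1 h]
    · right; right
      rw [List.eq_of_mem_replicate h]
      exact ⟨rfl, rfl⟩
  rw [pvOuts_sorted t_boss _ (pvSorted2_pairwise ev) htags 0]
  rw [hperm.countP_eq, hperm.countP_eq, hperm.countP_eq]
  rw [hev]
  simp only [List.countP_append, pvFlatMap_countP]
  rw [pvBfold]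
  simp only [List.countP_replicate]
  simp [PySem.List.length_pyRange_one, List.countP_false]
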